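-- pv_equiv track=rewrite | github.com/BatuhanUtebay/DVEngine | dvge/models/transitions.py | get_transition_suggestions
-- ===== SOURCE A (Python) =====
-- from typing import Dict, List, Optional, Any, Union
--
-- def get_transition_suggestions(context: Dict[str, Any]) -> List[str]:
--     """Suggest appropriate transitions based on context."""
--     scene_type = context.get("scene_type", "dialogue")
--     mood = context.get("mood", "neutral")
--     pacing = context.get("pacing", "normal")  # slow, normal, fast
--
--     suggestions = []
--
--     if scene_type == "dialogue":
--         if pacing == "slow":
--             suggestions.extend(["fade_in", "dissolve", "blur_in"])
--         elif pacing == "fast":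
--             suggestions.extend(["cut", "slide_in_left", "slide_in_right"])
--         else:
--             suggestions.extend(["fade_in", "crossfade", "slide_in_left"])
--
--     elif scene_type == "action":
--         suggestions.extend(["zoom_in", "slide_in_right", "wipe_left", "cut"])
--
--     elif scene_type == "dramatic":
--         suggestions.extend(["iris_in", "zoom_in", "rotate_in", "dissolve"])
--
--     elif scene_type == "comedy":
--         suggestions.extend(["flip_in", "rotate_in", "zoom_in"])
--
--     if mood == "mysterious":
--         suggestions.extend(["iris_in", "dissolve", "blur_in"])
--     elif mood == "cheerful":
--         suggestions.extend(["zoom_in", "flip_in", "rotate_in"])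
--     elif mood == "dramatic":
--         suggestions.extend(["iris_in", "wipe_left", "dissolve"])
--     elif mood == "tense":
--         suggestions.extend(["cut", "zoom_in", "slide_in_right"])
--
--     # Remove duplicates while preserving order
--     seen = set()
--     unique_suggestions = []
--     for suggestion in suggestions:
--         if suggestion not in seen:
--             seen.add(suggestion)
--             unique_suggestions.append(suggestion)
--
--     return unique_suggestions[:6]  # Return top 6 suggestions
-- ===== SOURCE B (Python) =====
-- # Fully precomputed answer table: every (scene-class, mood-class) combination's final
-- # deduplicated, truncated suggestion list is a literal; the function only classifies
-- # the context into one of 7x5 classes and returns the stored answer -- no list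
-- # building, concatenation, dedup or slicing happens at call time.
--
-- _ANSWERS = {
--     ("dialogue_slow", "mysterious"): ['fade_in', 'dissolve', 'blur_in', 'iris_in'],
--     ("dialogue_slow", "cheerful"): ['fade_in', 'dissolve', 'blur_in', 'zoom_in', 'flip_in', 'rotate_in'],
--     ("dialogue_slow", "dramatic"): ['fade_in', 'dissolve', 'blur_in', 'iris_in', 'wipe_left'],
--     ("dialogue_slow", "tense"): ['fade_in', 'dissolve', 'blur_in', 'cut', 'zoom_in', 'slide_in_right'],
--     ("dialogue_slow", "other"): ['fade_in', 'dissolve', 'blur_in'],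
--     ("dialogue_fast", "mysterious"): ['cut', 'slide_in_left', 'slide_in_right', 'iris_in', 'dissolve', 'blur_in'],
--     ("dialogue_fast", "cheerful"): ['cut', 'slide_in_left', 'slide_in_right', 'zoom_in', 'flip_in', 'rotate_in'],
--     ("dialogue_fast", "dramatic"): ['cut', 'slide_in_left', 'slide_in_right', 'iris_in', 'wipe_left', 'dissolve'],
--     ("dialogue_fast", "tense"): ['cut', 'slide_in_left', 'slide_in_right', 'zoom_in'],
--     ("dialogue_fast", "other"): ['cut', 'slide_in_left', 'slide_in_right'],
--     ("dialogue_normal", "mysterious"): ['fade_in', 'crossfade', 'slide_in_left', 'iris_in', 'dissolve', 'blur_in'],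
--     ("dialogue_normal", "cheerful"): ['fade_in', 'crossfade', 'slide_in_left', 'zoom_in', 'flip_in', 'rotate_in'],
--     ("dialogue_normal", "dramatic"): ['fade_in', 'crossfade', 'slide_in_left', 'iris_in', 'wipe_left', 'dissolve'],
--     ("dialogue_normal", "tense"): ['fade_in', 'crossfade', 'slide_in_left', 'cut', 'zoom_in', 'slide_in_right'],
--     ("dialogue_normal", "other"): ['fade_in', 'crossfade', 'slide_in_left'],
--     ("action", "mysterious"): ['zoom_in', 'slide_in_right', 'wipe_left', 'cut', 'iris_in', 'dissolve'],
--     ("action", "cheerful"): ['zoom_in', 'slide_in_right', 'wipe_left', 'cut', 'flip_in', 'rotate_in'],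
--     ("action", "dramatic"): ['zoom_in', 'slide_in_right', 'wipe_left', 'cut', 'iris_in', 'dissolve'],
--     ("action", "tense"): ['zoom_in', 'slide_in_right', 'wipe_left', 'cut'],
--     ("action", "other"): ['zoom_in', 'slide_in_right', 'wipe_left', 'cut'],
--     ("dramatic", "mysterious"): ['iris_in', 'zoom_in', 'rotate_in', 'dissolve', 'blur_in'],
--     ("dramatic", "cheerful"): ['iris_in', 'zoom_in', 'rotate_in', 'dissolve', 'flip_in'],
--     ("dramatic", "dramatic"): ['iris_in', 'zoom_in', 'rotate_in', 'dissolve', 'wipe_left'],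
--     ("dramatic", "tense"): ['iris_in', 'zoom_in', 'rotate_in', 'dissolve', 'cut', 'slide_in_right'],
--     ("dramatic", "other"): ['iris_in', 'zoom_in', 'rotate_in', 'dissolve'],
--     ("comedy", "mysterious"): ['flip_in', 'rotate_in', 'zoom_in', 'iris_in', 'dissolve', 'blur_in'],
--     ("comedy", "cheerful"): ['flip_in', 'rotate_in', 'zoom_in'],
--     ("comedy", "dramatic"): ['flip_in', 'rotate_in', 'zoom_in', 'iris_in', 'wipe_left', 'dissolve'],
--     ("comedy", "tense"): ['flip_in', 'rotate_in', 'zoom_in', 'cut', 'slide_in_right'],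
--     ("comedy", "other"): ['flip_in', 'rotate_in', 'zoom_in'],
--     ("other", "mysterious"): ['iris_in', 'dissolve', 'blur_in'],
--     ("other", "cheerful"): ['zoom_in', 'flip_in', 'rotate_in'],
--     ("other", "dramatic"): ['iris_in', 'wipe_left', 'dissolve'],
--     ("other", "tense"): ['cut', 'zoom_in', 'slide_in_right'],
--     ("other", "other"): [],
-- }
--
-- def get_transition_suggestions(context):
--     scene_type = context.get("scene_type", "dialogue")
--     if scene_type == "dialogue":
--         pacing = context.get("pacing", "normal")
--         scene_class = "dialogue_" + (pacing if pacing in ("slow", "fast") else "normal")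
--     elif scene_type in ("action", "dramatic", "comedy"):
--         scene_class = scene_type
--     else:
--         scene_class = "other"
--     mood = context.get("mood", "neutral")
--     mood_class = mood if mood in ("mysterious", "cheerful", "dramatic", "tense") else "other"
--     return list(_ANSWERS[(scene_class, mood_class)])
-- ===== Notes on version B (the rewrite author's own statement) =====
-- stated objective: alternative
-- what changed: B precomputes the final answer for every (scene-class, mood-class) combination into a literal 7x5 table of already-deduplicated, truncated lists; at call time it only classifies the context and returns the stored list, doing no list building, concatenation, dedup or slicing.
import Mathlib
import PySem

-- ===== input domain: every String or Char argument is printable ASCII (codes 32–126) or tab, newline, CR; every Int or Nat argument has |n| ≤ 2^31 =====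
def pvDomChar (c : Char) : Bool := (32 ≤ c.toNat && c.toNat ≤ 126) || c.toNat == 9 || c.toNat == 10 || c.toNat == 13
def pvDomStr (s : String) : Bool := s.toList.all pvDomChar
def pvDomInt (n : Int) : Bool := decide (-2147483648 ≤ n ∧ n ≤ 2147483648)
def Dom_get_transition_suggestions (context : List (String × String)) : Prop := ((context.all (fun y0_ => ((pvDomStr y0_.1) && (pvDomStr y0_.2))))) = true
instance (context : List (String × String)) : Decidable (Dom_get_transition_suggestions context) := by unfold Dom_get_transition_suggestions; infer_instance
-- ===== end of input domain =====

-- B replaces A's build-concatenate-dedup-truncate pipeline with a precomputed literal answer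
-- table indexed by a (scene-class, mood-class) classification; equivalence of return values is proved on all inputs.

-- ===== PORT A =====
def get_transition_suggestions (context : List (String × String)) : List String :=
  let scene_type := (PySem.Dict.mk context).getD "scene_type" "dialogue"
  let mood := (PySem.Dict.mk context).getD "mood" "neutral"
  let pacing := (PySem.Dict.mk context).getD "pacing" "normal"
  let suggestions : List String := []
  let suggestions :=
    if scene_type = "dialogue" then
      if pacing = "slow" then suggestions ++ ["fade_in", "dissolve", "blur_in"]
      else if pacing = "fast" then suggestions ++ ["cut", "slide_in_left", "slide_in_right"]
      else suggestions ++ ["fade_in", "crossfade", "slide_in_left"]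
    else if scene_type = "action" then suggestions ++ ["zoom_in", "slide_in_right", "wipe_left", "cut"]
    else if scene_type = "dramatic" then suggestions ++ ["iris_in", "zoom_in", "rotate_in", "dissolve"]
    else if scene_type = "comedy" then suggestions ++ ["flip_in", "rotate_in", "zoom_in"]
    else suggestions
  let suggestions :=
    if mood = "mysterious" then suggestions ++ ["iris_in", "dissolve", "blur_in"]
    else if mood = "cheerful" then suggestions ++ ["zoom_in", "flip_in", "rotate_in"]
    else if mood = "dramatic" then suggestions ++ ["iris_in", "wipe_left", "dissolve"]
    else if mood = "tense" then suggestions ++ ["cut", "zoom_in", "slide_in_right"]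
    else suggestions
  -- the seen-set dedup loop
  let st := suggestions.foldl
    (fun (st : PySem.Set String × List String) s =>
      if PySem.Set.contains st.1 s then st
      else (PySem.Set.add st.1 s, st.2 ++ [s]))
    (PySem.Set.empty, [])
  st.2.take 6

-- ===== PORT B =====
-- the precomputed answer table of Source B, verbatim
def answersTable : PySem.Dict (String × String) (List String) := PySem.Dict.mk
  [(("dialogue_slow", "mysterious"), ["fade_in", "dissolve", "blur_in", "iris_in"]),
   (("dialogue_slow", "cheerful"), ["fade_in", "dissolve", "blur_in", "zoom_in", "flip_in", "rotate_in"]),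
   (("dialogue_slow", "dramatic"), ["fade_in", "dissolve", "blur_in", "iris_in", "wipe_left"]),
   (("dialogue_slow", "tense"), ["fade_in", "dissolve", "blur_in", "cut", "zoom_in", "slide_in_right"]),
   (("dialogue_slow", "other"), ["fade_in", "dissolve", "blur_in"]),
   (("dialogue_fast", "mysterious"), ["cut", "slide_in_left", "slide_in_right", "iris_in", "dissolve", "blur_in"]),
   (("dialogue_fast", "cheerful"), ["cut", "slide_in_left", "slide_in_right", "zoom_in", "flip_in", "rotate_in"]),
   (("dialogue_fast", "dramatic"), ["cut", "slide_in_left", "slide_in_right", "iris_in", "wipe_left", "dissolve"]),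
   (("dialogue_fast", "tense"), ["cut", "slide_in_left", "slide_in_right", "zoom_in"]),
   (("dialogue_fast", "other"), ["cut", "slide_in_left", "slide_in_right"]),
   (("dialogue_normal", "mysterious"), ["fade_in", "crossfade", "slide_in_left", "iris_in", "dissolve", "blur_in"]),
   (("dialogue_normal", "cheerful"), ["fade_in", "crossfade", "slide_in_left", "zoom_in", "flip_in", "rotate_in"]),
   (("dialogue_normal", "dramatic"), ["fade_in", "crossfade", "slide_in_left", "iris_in", "wipe_left", "dissolve"]),
   (("dialogue_normal", "tense"), ["fade_in", "crossfade", "slide_in_left", "cut", "zoom_in", "slide_in_right"]),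
   (("dialogue_normal", "other"), ["fade_in", "crossfade", "slide_in_left"]),
   (("action", "mysterious"), ["zoom_in", "slide_in_right", "wipe_left", "cut", "iris_in", "dissolve"]),
   (("action", "cheerful"), ["zoom_in", "slide_in_right", "wipe_left", "cut", "flip_in", "rotate_in"]),
   (("action", "dramatic"), ["zoom_in", "slide_in_right", "wipe_left", "cut", "iris_in", "dissolve"]),
   (("action", "tense"), ["zoom_in", "slide_in_right", "wipe_left", "cut"]),
   (("action", "other"), ["zoom_in", "slide_in_right", "wipe_left", "cut"]),
   (("dramatic", "mysterious"), ["iris_in", "zoom_in", "rotate_in", "dissolve", "blur_in"]),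
   (("dramatic", "cheerful"), ["iris_in", "zoom_in", "rotate_in", "dissolve", "flip_in"]),
   (("dramatic", "dramatic"), ["iris_in", "zoom_in", "rotate_in", "dissolve", "wipe_left"]),
   (("dramatic", "tense"), ["iris_in", "zoom_in", "rotate_in", "dissolve", "cut", "slide_in_right"]),
   (("dramatic", "other"), ["iris_in", "zoom_in", "rotate_in", "dissolve"]),
   (("comedy", "mysterious"), ["flip_in", "rotate_in", "zoom_in", "iris_in", "dissolve", "blur_in"]),
   (("comedy", "cheerful"), ["flip_in", "rotate_in", "zoom_in"]),
   (("comedy", "dramatic"), ["flip_in", "rotate_in", "zoom_in", "iris_in", "wipe_left", "dissolve"]),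
   (("comedy", "tense"), ["flip_in", "rotate_in", "zoom_in", "cut", "slide_in_right"]),
   (("comedy", "other"), ["flip_in", "rotate_in", "zoom_in"]),
   (("other", "mysterious"), ["iris_in", "dissolve", "blur_in"]),
   (("other", "cheerful"), ["zoom_in", "flip_in", "rotate_in"]),
   (("other", "dramatic"), ["iris_in", "wipe_left", "dissolve"]),
   (("other", "tense"), ["cut", "zoom_in", "slide_in_right"]),
   (("other", "other"), [])]

def get_transition_suggestions_alt (context : List (String × String)) : List String :=
  let scene_type := (PySem.Dict.mk context).getD "scene_type" "dialogue"
  let scene_class :=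
    if scene_type = "dialogue" then
      let pacing := (PySem.Dict.mk context).getD "pacing" "normal"
      "dialogue_" ++ (if pacing = "slow" ∨ pacing = "fast" then pacing else "normal")
    else if scene_type = "action" ∨ scene_type = "dramatic" ∨ scene_type = "comedy" then scene_type
    else "other"
  let mood := (PySem.Dict.mk context).getD "mood" "neutral"
  let mood_class :=
    if mood = "mysterious" ∨ mood = "cheerful" ∨ mood = "dramatic" ∨ mood = "tense" then mood
    else "other"
  -- the key (scene_class, mood_class) is always present; getD [] is exact for Python's indexing here
  answersTable.getD (scene_class, mood_class) []

-- ===== PRECONDITION & SPEC =====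
def Spec_get_transition_suggestions (context : List (String × String)) (out : List String) : Prop := out = get_transition_suggestions_alt context
instance (context : List (String × String)) (out : List String) : Decidable (Spec_get_transition_suggestions context out) := by unfold Spec_get_transition_suggestions; infer_instance

-- ===== CLAIM (what is proved, stated in full; the proofs are below) =====
def Claim_equal_get_transition_suggestions : Prop := ∀ (context : List (String × String)), Dom_get_transition_suggestions context → Spec_get_transition_suggestions context (get_transition_suggestions context)

-- ===== LEMMAS AND PROOFS =====

-- The core case analysis: both programs depend only on the three looked-up strings.
theorem core_eq (s m p : String) :
    (let suggestions : List String := []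
     let suggestions :=
       if s = "dialogue" then
         if p = "slow" then suggestions ++ ["fade_in", "dissolve", "blur_in"]
         else if p = "fast" then suggestions ++ ["cut", "slide_in_left", "slide_in_right"]
         else suggestions ++ ["fade_in", "crossfade", "slide_in_left"]
       else if s = "action" then suggestions ++ ["zoom_in", "slide_in_right", "wipe_left", "cut"]
       else if s = "dramatic" then suggestions ++ ["iris_in", "zoom_in", "rotate_in", "dissolve"]
       else if s = "comedy" then suggestions ++ ["flip_in", "rotate_in", "zoom_in"]
       else suggestions
     let suggestions :=
       if m = "mysterious" then suggestions ++ ["iris_in", "dissolve", "blur_in"]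
       else if m = "cheerful" then suggestions ++ ["zoom_in", "flip_in", "rotate_in"]
       else if m = "dramatic" then suggestions ++ ["iris_in", "wipe_left", "dissolve"]
       else if m = "tense" then suggestions ++ ["cut", "zoom_in", "slide_in_right"]
       else suggestions
     let st := suggestions.foldl
       (fun (st : PySem.Set String × List String) x =>
         if PySem.Set.contains st.1 x then st
         else (PySem.Set.add st.1 x, st.2 ++ [x]))
       (PySem.Set.empty, [])
     st.2.take 6)
    =
    (let scene_class :=
       if s = "dialogue" then "dialogue_" ++ (if p = "slow" ∨ p = "fast" then p else "normal")
       else if s = "action" ∨ s = "dramatic" ∨ s = "comedy" then s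
       else "other"
     let mood_class :=
       if m = "mysterious" ∨ m = "cheerful" ∨ m = "dramatic" ∨ m = "tense" then m
       else "other"
     answersTable.getD (scene_class, mood_class) []) := by
  by_cases h1 : s = "dialogue" <;>
  by_cases h2 : s = "action" <;>
  by_cases h3 : s = "dramatic" <;>
  by_cases h4 : s = "comedy" <;>
  by_cases h5 : p = "slow" <;>
  by_cases h6 : p = "fast" <;>
  by_cases m1 : m = "mysterious" <;>
  by_cases m2 : m = "cheerful" <;>
  by_cases m3 : m = "dramatic" <;>
  by_cases m4 : m = "tense" <;>
  simp_all <;> decide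

-- ===== VERDICT (by name: the statement is the Claim_ definition above) =====
theorem get_transition_suggestions_spec : Claim_equal_get_transition_suggestions := by
  intro context _
  unfold Spec_get_transition_suggestions get_transition_suggestions get_transition_suggestions_alt
  exact core_eq _ _ _
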